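-- pv_equiv track=rewrite | github.com/weniv/pythonalgo100 | src/py/answer.py | solution
-- ===== SOURCE A (Python) =====
-- def solution(data):
--     all_schedules = []
--
--     for day, dates in data.items():
--         for date in dates:
--             converted_date = f"{date[2:]} {day}"
--             all_schedules.append(converted_date)
--     all_schedules.sort(reverse=True)
--     return all_schedules[:3]
-- ===== SOURCE B (Python) =====
-- def _insert_top3(top, s):
--     # insert s into the descending list top (length <= 3), keep only the 3 largest
--     if not top:
--         return [s]
--     if s <= top[0]:
--         return ([top[0]] + _insert_top3(top[1:], s))[:3]
--     return ([s] + top)[:3]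
--
--
-- def solution(data):
--     top = []
--     for day, dates in data.items():
--         for date in dates:
--             top = _insert_top3(top, f"{date[2:]} {day}")
--     return top
-- ===== Notes on version B (the rewrite author's own statement) =====
-- stated objective: alternative
-- what changed: Replaces build-all/full-sort/slice with a single pass that maintains only the three largest formatted strings via bounded sorted insertion (no intermediate list, no full sort).
import Mathlib
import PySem

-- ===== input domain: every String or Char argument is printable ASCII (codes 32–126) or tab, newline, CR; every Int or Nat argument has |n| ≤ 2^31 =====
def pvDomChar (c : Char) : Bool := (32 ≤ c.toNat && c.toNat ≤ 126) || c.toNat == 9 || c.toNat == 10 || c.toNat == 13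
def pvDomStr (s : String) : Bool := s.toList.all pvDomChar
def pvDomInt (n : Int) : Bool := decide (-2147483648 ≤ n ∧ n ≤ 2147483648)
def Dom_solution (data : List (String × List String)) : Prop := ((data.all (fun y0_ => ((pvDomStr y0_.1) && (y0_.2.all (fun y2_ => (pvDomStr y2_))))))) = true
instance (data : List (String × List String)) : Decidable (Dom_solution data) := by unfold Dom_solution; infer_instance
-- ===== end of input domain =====

-- B keeps only the three largest formatted strings in one pass (bounded sorted insertion)
-- instead of building the whole list, fully sorting it descending and slicing [:3].

-- shared formatting helper: f"{date[2:]} {day}" (identical in both Pythons)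
def pvFmt (day date : String) : String :=
  PySem.Str.join "" [PySem.Str.slice date (some 2) none, " ", day]

-- ===== PORT A =====
def solution (data : List (String × List String)) : List String :=
  let all_schedules :=
    data.foldl (fun acc p => p.2.foldl (fun acc date => acc ++ [pvFmt p.1 date]) acc) []
  PySem.List.slice (PySem.List.sorted all_schedules (fun x => x) true) none (some 3)

-- ===== PORT B =====
-- _insert_top3: insert s into the descending list top, keeping only the 3 largest
def insertTop3 (top : List String) (s : String) : List String :=
  match top with
  | [] => [s]
  | t :: rest => if s ≤ t then (t :: insertTop3 rest s).take 3 else (s :: t :: rest).take 3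

def solution_alt (data : List (String × List String)) : List String :=
  data.foldl (fun top p => p.2.foldl (fun top date => insertTop3 top (pvFmt p.1 date)) top) []

-- ===== PRECONDITION & SPEC =====
def Spec_solution (data : List (String × List String)) (out : List String) : Prop := out = solution_alt data
instance (data : List (String × List String)) (out : List String) : Decidable (Spec_solution data out) := by unfold Spec_solution; infer_instance

-- ===== CLAIM (what is proved, stated in full; the proofs are below) =====
def Claim_equal_solution : Prop := ∀ (data : List (String × List String)), Dom_solution data → Spec_solution data (solution data)

-- ===== LEMMAS AND PROOFS =====

-- insertTop3 is insertion (after equals) followed by truncation to 3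
theorem insertTop3_eq_insertBy_take (top : List String) (s : String) :
    insertTop3 top s =
      (PySem.List.insertBy (fun a b => decide (b < a)) s top).take 3 := by
  induction top with
  | nil => simp [insertTop3, PySem.List.insertBy]
  | cons t rest ih =>
    by_cases h : s ≤ t
    · have h' : ¬ t < s := not_lt.mpr h
      simp [insertTop3, PySem.List.insertBy, h, h', ih, List.take_take]
    · have h' : t < s := lt_of_not_ge h
      simp [insertTop3, PySem.List.insertBy, h, h']

-- truncating the accumulator before inserting does not change the first n elements
theorem insertBy_take_take {α : Type} (bf : α → α → Bool) (s : α) :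
    ∀ (S : List α) (n : Nat),
      (PySem.List.insertBy bf s (S.take n)).take n = (PySem.List.insertBy bf s S).take n := by
  intro S
  induction S with
  | nil => intro n; simp
  | cons t rest ih =>
    intro n
    cases n with
    | zero => simp
    | succ m =>
      by_cases h : bf s t
      · have hm : (t :: rest.take m).take m = (t :: rest).take m := by
          cases m with
          | zero => simp
          | succ k => simp [List.take_take]
        simp [PySem.List.insertBy, h, hm]
      · simp [PySem.List.insertBy, h, ih m]

-- fold invariant: B's accumulator is the 3-truncation of A's insertion-sort accumulator
theorem foldl_insertTop3_take (l : List String) :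
    ∀ (S : List String),
      l.foldl insertTop3 (S.take 3) =
        (l.foldl (fun acc x => PySem.List.insertBy (fun a b => decide (b < a)) x acc) S).take 3 := by
  induction l with
  | nil => intro S; simp
  | cons x l ih =>
    intro S
    have hstep : insertTop3 (S.take 3) x =
        ((PySem.List.insertBy (fun a b => decide (b < a)) x S).take 3) := by
      rw [insertTop3_eq_insertBy_take, insertBy_take_take]
    simp only [List.foldl_cons, hstep]
    exact ih (PySem.List.insertBy (fun a b => decide (b < a)) x S)

theorem foldl_insertTop3_eq_sorted_take (l : List String) :
    l.foldl insertTop3 [] = (PySem.List.sorted l (fun x => x) true).take 3 := by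
  have h := foldl_insertTop3_take l []
  simp only [List.take_nil] at h
  rw [h, PySem.List.sorted_rev_eq_foldl_insertBy]

-- ===== VERDICT (by name: the statement is the Claim_ definition above) =====
theorem solution_spec : Claim_equal_solution := by
  intro data _
  unfold Spec_solution solution solution_alt
  have hfun : (fun (acc : List String) (p : String × List String) =>
        p.2.foldl (fun acc date => acc ++ [pvFmt p.1 date]) acc)
      = (fun acc p => acc ++ p.2.map (pvFmt p.1)) := by
    funext acc p
    rw [PySem.List.foldl_append_eq_flatMap]
    congr 1
    induction p.2 with
    | nil => rfl
    | cons d ds ih => simp [List.flatMap_cons, ih]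
  have hA : data.foldl (fun acc p => p.2.foldl (fun acc date => acc ++ [pvFmt p.1 date]) acc) []
      = data.flatMap (fun p => p.2.map (pvFmt p.1)) := by
    rw [hfun]
    simpa using PySem.List.foldl_append_eq_flatMap (fun p => p.2.map (pvFmt p.1)) data []
  have hB : data.foldl (fun top p => p.2.foldl (fun top date => insertTop3 top (pvFmt p.1 date)) top) []
      = (data.flatMap (fun p => p.2.map (pvFmt p.1))).foldl insertTop3 [] := by
    rw [List.foldl_flatMap]
    have : (fun (top : List String) (p : String × List String) =>
          p.2.foldl (fun top date => insertTop3 top (pvFmt p.1 date)) top)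
        = (fun acc p => (p.2.map (pvFmt p.1)).foldl insertTop3 acc) := by
      funext acc p
      exact (List.foldl_map).symm
    rw [this]
  rw [hA, hB, foldl_insertTop3_eq_sorted_take, PySem.List.slice_to _ (by norm_num)]
  have h3 : (3 : Int).toNat = 3 := rfl
  rw [h3]
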